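-- pv_equiv track=rewrite | github.com/Kazun1998/library_for_python | Convolution/GCD_Convolution.py | Convolution_GCD
-- ===== SOURCE A (Python) =====
-- def Multiple_Zeta_Transform(A):
--     """ A の倍数を走るにおける Zeta 変換を行う.
--
--     ※ A[0] の値は無視される.
--     """
--
--     N=len(A)-1
--     S=[1]*(N+1)
--
--     for p in range(2,N+1):
--         if S[p]:
--             for k in range(N//p,0,-1):
--                 S[k*p]=0
--                 A[k]+=A[k*p]
--
--     for i in range(1,N+1):
--         A[i]%=Mod
--
-- def Multiple_Mobius_Transform(A):
--     """ A の約数における Mobius 変換を行う.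
--
--     ※ A[0] の値は無視される.
--     """
--
--     N=len(A)-1
--     S=[1]*(N+1)
--
--     for p in range(2,N+1):
--         if S[p]:
--             for k in range(1,N//p+1):
--                 S[k*p]=0
--                 A[k]-=A[k*p]
--
--     for i in range(1,N+1):
--         A[i]%=Mod
--
-- def Convolution_GCD(A,B):
--     """ A,B の gcd における畳み込みを行う.
--
--     ※ A[0], B[0] の値は無視される.
--     """
--
--     N=len(A)-1; M=len(B)-1; L=max(N,M)
--
--     A=A+[0]*(L-N)
--     B=B+[0]*(L-M)
--
--     Multiple_Zeta_Transform(A)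
--     Multiple_Zeta_Transform(B)
--
--     for i in range(1,L+1):
--         A[i]*=B[i]
--         A[i]%=Mod
--
--     Multiple_Mobius_Transform(A)
--     return A
--
-- Mod=998244353
-- ===== SOURCE B (Python) =====
-- Mod = 998244353
--
-- def _zeta(C):
--     # in-place multiple-zeta: C[i] <- (sum of C[j] over multiples j of i) % Mod
--     n = len(C) - 1
--     for i in range(1, n + 1):
--         s = 0
--         for j in range(i, n + 1, i):
--             s += C[j]
--         C[i] = s % Mod
--
-- def _mobius(C):
--     # in-place multiple-Moebius (inverse of _zeta mod Mod), descending
--     n = len(C) - 1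
--     for i in range(n, 0, -1):
--         s = C[i]
--         for j in range(2 * i, n + 1, i):
--             s -= C[j]
--         C[i] = s % Mod
--
-- def Convolution_GCD(A, B):
--     L = max(len(A), len(B))
--     C = A + [0] * (L - len(A))
--     D = B + [0] * (L - len(B))
--     _zeta(C)
--     _zeta(D)
--     for i in range(1, L):
--         C[i] = C[i] * D[i] % Mod
--     _mobius(C)
--     return C
-- ===== Notes on version B (the rewrite author's own statement) =====
-- stated objective: simpler
-- what changed: Replaced the prime-sieve zeta/Moebius transforms by direct harmonic divisor loops (ascending sum over multiples for zeta, descending subtraction for the inverse), dropping the S[] primality sieve entirely.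
import Mathlib
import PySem

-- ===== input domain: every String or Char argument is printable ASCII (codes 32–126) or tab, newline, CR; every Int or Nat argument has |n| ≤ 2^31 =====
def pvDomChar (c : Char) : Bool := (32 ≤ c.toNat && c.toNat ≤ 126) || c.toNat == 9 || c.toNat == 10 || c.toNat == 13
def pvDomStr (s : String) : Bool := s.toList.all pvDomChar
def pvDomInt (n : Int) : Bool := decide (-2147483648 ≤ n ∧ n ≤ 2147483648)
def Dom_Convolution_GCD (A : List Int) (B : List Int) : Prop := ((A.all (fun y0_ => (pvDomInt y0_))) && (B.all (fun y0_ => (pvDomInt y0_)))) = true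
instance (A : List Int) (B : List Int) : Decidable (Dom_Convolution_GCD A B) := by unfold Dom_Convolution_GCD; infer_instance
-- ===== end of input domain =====

-- B replaces A's prime-sieve zeta/Moebius transforms by plain harmonic divisor loops (objective: simpler).
-- Python A rebinds its parameters (A = A + [...]), so neither program mutates the caller's lists.

def modP : Int := 998244353

-- ===== PORT A =====
-- one iteration of the outer `for p in range(2, N+1)` loop of Multiple_Zeta_Transform;
-- the inner loop `for k in range(N//p, 0, -1)` is the foldl over the reversed range
def sieveZstep (N : Nat) (SA : List Int × List Int) (p : Nat) : List Int × List Int :=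
  if SA.1.getD p 0 ≠ 0 then
    ((List.range' 1 (N / p)).reverse).foldl
      (fun SA k => (SA.1.set (k * p) 0, SA.2.set k (SA.2.getD k 0 + SA.2.getD (k * p) 0))) SA
  else SA

-- `for i in range(1, N+1): A[i] %= Mod`
def modPass (N : Nat) (A : List Int) : List Int :=
  (List.range' 1 N).foldl (fun A i => A.set i (PySem.Int.mod (A.getD i 0) modP)) A

def Multiple_Zeta_Transform (A : List Int) : List Int :=
  let N := A.length - 1
  let SA := (List.range' 2 (N - 1)).foldl (sieveZstep N) (List.replicate (N + 1) (1 : Int), A)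
  modPass N SA.2

-- one iteration of the outer loop of Multiple_Mobius_Transform (inner loop ascending)
def sieveMstep (N : Nat) (SA : List Int × List Int) (p : Nat) : List Int × List Int :=
  if SA.1.getD p 0 ≠ 0 then
    (List.range' 1 (N / p)).foldl
      (fun SA k => (SA.1.set (k * p) 0, SA.2.set k (SA.2.getD k 0 - SA.2.getD (k * p) 0))) SA
  else SA

def Multiple_Mobius_Transform (A : List Int) : List Int :=
  let N := A.length - 1
  let SA := (List.range' 2 (N - 1)).foldl (sieveMstep N) (List.replicate (N + 1) (1 : Int), A)
  modPass N SA.2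

def Convolution_GCD (A : List Int) (B : List Int) : List Int :=
  let L := max A.length B.length
  let A1 := A ++ List.replicate (L - A.length) 0
  let B1 := B ++ List.replicate (L - B.length) 0
  let A2 := Multiple_Zeta_Transform A1
  let B2 := Multiple_Zeta_Transform B1
  let A3 := (List.range' 1 (L - 1)).foldl
      (fun C i => C.set i (PySem.Int.mod (C.getD i 0 * B2.getD i 0) modP)) A2
  Multiple_Mobius_Transform A3

-- ===== PORT B =====
-- _zeta: ascending harmonic loop; `range(i, n+1, i)` is exactly [1*i, 2*i, …, (n/i)*i]
def zetaAlt (C : List Int) : List Int :=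
  let n := C.length - 1
  (List.range' 1 n).foldl
    (fun C i =>
      C.set i (PySem.Int.mod
        (((List.range' 1 (n / i)).map (fun k => k * i)).foldl (fun s j => s + C.getD j 0) 0) modP)) C

-- _mobius: descending harmonic loop; `range(2*i, n+1, i)` is exactly [2*i, 3*i, …, (n/i)*i]
def mobiusAlt (C : List Int) : List Int :=
  let n := C.length - 1
  ((List.range' 1 n).reverse).foldl
    (fun C i =>
      C.set i (PySem.Int.mod
        (((List.range' 2 (n / i - 1)).map (fun k => k * i)).foldl (fun s j => s - C.getD j 0)
          (C.getD i 0)) modP)) C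

def Convolution_GCD_alt (A : List Int) (B : List Int) : List Int :=
  let L := max A.length B.length
  let C := A ++ List.replicate (L - A.length) 0
  let D := B ++ List.replicate (L - B.length) 0
  let C1 := zetaAlt C
  let D1 := zetaAlt D
  let C2 := (List.range' 1 (L - 1)).foldl
      (fun C i => C.set i (PySem.Int.mod (C.getD i 0 * D1.getD i 0) modP)) C1
  mobiusAlt C2

-- ===== PRECONDITION & SPEC =====
def Spec_Convolution_GCD (A : List Int) (B : List Int) (out : List Int) : Prop := out = Convolution_GCD_alt A B
instance (A : List Int) (B : List Int) (out : List Int) : Decidable (Spec_Convolution_GCD A B out) := by unfold Spec_Convolution_GCD; infer_instance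

-- ===== CLAIM (what is proved, stated in full; the proofs are below) =====
def Claim_equal_Convolution_GCD : Prop := ∀ (A : List Int) (B : List Int), Dom_Convolution_GCD A B → Spec_Convolution_GCD A B (Convolution_GCD A B)

-- ===== LEMMAS AND PROOFS =====

-- array entry as a total function
def fIdx (l : List Int) : Nat → Int := fun i => l.getD i 0

-- the multiples of i in [1,N] whose cofactor j/i is q-smooth
def mset (N q i : Nat) : Finset Nat :=
  (Finset.Icc 1 N).filter (fun j => i ∣ j ∧ ∀ r ∈ (j / i).primeFactors, r ≤ q)

-- all multiples of i in [1,N]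
def msetF (N i : Nat) : Finset Nat := (Finset.Icc 1 N).filter (fun j => i ∣ j)

def ZSq (f : Nat → Int) (N q i : Nat) : Int := ∑ j ∈ mset N q i, f j
def ZS (f : Nat → Int) (N i : Nat) : Int := ∑ j ∈ msetF N i, f j

-- the common recursive description of both Moebius stages (mod applied at each entry)
def vref (f : Nat → Int) (N i : Nat) : Int :=
  PySem.Int.mod
      (f i - (((List.range' 2 (N / i - 1)).attach).map (fun k => vref f N (k.1 * i))).sum) modP
termination_by N + 1 - i
decreasing_by
  obtain ⟨t, ht, hkt⟩ := List.mem_range'.1 k.2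
  simp only [one_mul] at hkt
  have hle : k.1 ≤ N / i := by omega
  have hi : 1 ≤ i := by
    rcases Nat.eq_zero_or_pos i with hi0 | hi0
    · exfalso; have : N / i = 0 := by rw [hi0]; simp
      omega
    · exact hi0
  have hkiN : k.1 * i ≤ N := le_trans (Nat.mul_le_mul_right i hle) (Nat.div_mul_le_self N i)
  have hlt : i < k.1 * i := by
    have := (Nat.mul_lt_mul_right (show 0 < i by omega)).2 (show 1 < k.1 by omega)
    omega
  omega

lemma vref_eq (f : Nat → Int) (N i : Nat) :
    vref f N i = PySem.Int.mod
      (f i - ((List.range' 2 (N / i - 1)).map (fun k => vref f N (k * i))).sum) modP := by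
  rw [vref]
  congr 2
  rw [List.map_attach_eq_pmap]
  simp

-- getD after set
lemma getD_set' (l : List Int) (i j : Nat) (v : Int) :
    (l.set i v).getD j 0 = if i = j ∧ i < l.length then v else l.getD j 0 := by
  simp only [List.getD, List.getElem?_set]
  split_ifs with h1 h2 h3 h4 <;> simp_all <;> omega

lemma getD_replicate' (n m : Nat) : (List.replicate n (1 : Int)).getD m 0 = if m < n then 1 else 0 := by
  simp [List.getD, List.getElem?_replicate]
  split_ifs <;> rfl

-- fold with subtraction / addition as a sum
lemma foldl_sub_eq (l : List Nat) (g : Nat → Int) (a : Int) :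
    l.foldl (fun s j => s - g j) a = a - (l.map g).sum := by
  induction l generalizing a with
  | nil => simp
  | cons x xs ih => simp [ih]; ring

lemma foldl_add_eq (l : List Nat) (g : Nat → Int) (a : Int) :
    l.foldl (fun s j => s + g j) a = a + (l.map g).sum := by
  induction l generalizing a with
  | nil => simp
  | cons x xs ih => simp [ih]; ring

-- list sum over range' 1 m as a Finset sum over Icc 1 m
lemma sum_range'_one (m : Nat) (h : Nat → Int) :
    ((List.range' 1 m).map h).sum = ∑ k ∈ Finset.Icc 1 m, h k := by
  induction m with
  | zero => simp
  | succ t ih =>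
    rw [List.range'_concat, Finset.sum_Icc_succ_top (by omega)]
    simp [ih]
    norm_num [Nat.add_comm]

-- reindexing the multiples of i in [1,N] by the cofactor
lemma sum_msetF (f : Nat → Int) (N i : Nat) (hi : 1 ≤ i) :
    ∑ j ∈ msetF N i, f j = ∑ k ∈ Finset.Icc 1 (N / i), f (k * i) := by
  apply Finset.sum_nbij' (i := fun j => j / i) (j := fun k => k * i)
  · intro a ha
    simp [msetF, Finset.mem_filter, Finset.mem_Icc] at ha ⊢
    obtain ⟨⟨h1, h2⟩, hd⟩ := ha
    constructor
    · exact Nat.one_le_div_iff (by omega) |>.2 (Nat.le_of_dvd (by omega) hd)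
    · exact Nat.div_le_div_right h2
  · intro k hk
    simp only [msetF, Finset.mem_filter, Finset.mem_Icc] at hk ⊢
    obtain ⟨hk1, hk2⟩ := Finset.mem_Icc.1 (by simpa using hk)
    have h1 : 1 ≤ k * i := le_trans hk1 (Nat.le_mul_of_pos_right k (by omega))
    have h2 : k * i ≤ N := (Nat.le_div_iff_mul_le (by omega)).1 hk2
    exact ⟨⟨h1, h2⟩, dvd_mul_left i k⟩
  · intro a ha
    simp [msetF, Finset.mem_filter] at ha
    exact Nat.div_mul_cancel ha.2
  · intro k hk
    exact Nat.mul_div_cancel k (by omega)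
  · intro a ha
    simp [msetF, Finset.mem_filter] at ha
    rw [Nat.div_mul_cancel ha.2]

-- basic mset facts
lemma mset_one (N i : Nat) (hi : 1 ≤ i) (hiN : i ≤ N) : mset N 1 i = {i} := by
  ext j
  simp only [mset, Finset.mem_filter, Finset.mem_Icc, Finset.mem_singleton]
  constructor
  · rintro ⟨⟨h1, h2⟩, hd, hsm⟩
    have hji : 1 ≤ j / i := Nat.one_le_div_iff (by omega) |>.2 (Nat.le_of_dvd (by omega) hd)
    have hone : j / i = 1 := by
      by_contra hne
      have hmf := Nat.minFac_prime hne
      have hdv := Nat.minFac_dvd (j / i)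
      have hmem : (j / i).minFac ∈ (j / i).primeFactors :=
        Nat.mem_primeFactors.2 ⟨hmf, hdv, by omega⟩
      have := hsm _ hmem
      have := hmf.two_le
      omega
    have hx := Nat.div_mul_cancel hd
    rw [hone, one_mul] at hx
    omega
  · rintro rfl
    refine ⟨⟨by omega, hiN⟩, dvd_refl j, ?_⟩
    intro r hr
    rw [Nat.div_self (show 0 < j by omega)] at hr
    simp at hr

lemma mset_nonprime (N p i : Nat) (hp2 : 2 ≤ p) (hnp : ¬ p.Prime) :
    mset N p i = mset N (p - 1) i := by
  ext j
  simp only [mset, Finset.mem_filter, Finset.mem_Icc]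
  constructor
  · rintro ⟨hj, hd, hsm⟩
    refine ⟨hj, hd, fun r hr => ?_⟩
    have := hsm r hr
    have hrp : r ≠ p := fun h => hnp (h ▸ (Nat.mem_primeFactors.1 hr).1)
    omega
  · rintro ⟨hj, hd, hsm⟩
    exact ⟨hj, hd, fun r hr => by have := hsm r hr; omega⟩

lemma mset_top (N p k : Nat) (hk : 1 ≤ k) (h : N < k * p) :
    mset N p k = mset N (p - 1) k := by
  ext j
  simp only [mset, Finset.mem_filter, Finset.mem_Icc]
  constructor
  · rintro ⟨hj, hd, hsm⟩
    refine ⟨hj, hd, fun r hr => ?_⟩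
    have hrle := hsm r hr
    obtain ⟨hrp, hrd, hne⟩ := Nat.mem_primeFactors.1 hr
    have hrp2 : r ≠ p := by
      rintro rfl
      have : r ≤ j / k := Nat.le_of_dvd (by
        have : 1 ≤ j / k := Nat.one_le_div_iff (by omega) |>.2 (Nat.le_of_dvd (by omega) hd)
        omega) hrd
      have hjk : j = k * (j / k) := (Nat.mul_div_cancel' hd).symm
      have : k * r ≤ k * (j / k) := Nat.mul_le_mul_left k this
      have : k * r ≤ j := by omega
      have : j ≤ N := hj.2
      omega
    omega
  · rintro ⟨hj, hd, hsm⟩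
    exact ⟨hj, hd, fun r hr => by have := hsm r hr; omega⟩

lemma mset_all (N i : Nat) (hi : 1 ≤ i) : mset N N i = msetF N i := by
  ext j
  simp only [mset, msetF, Finset.mem_filter, Finset.mem_Icc]
  constructor
  · rintro ⟨hj, hd, _⟩; exact ⟨hj, hd⟩
  · rintro ⟨hj, hd⟩
    refine ⟨hj, hd, fun r hr => ?_⟩
    obtain ⟨hrp, hrd, hne⟩ := Nat.mem_primeFactors.1 hr
    have h1 : 1 ≤ j / i := Nat.one_le_div_iff (by omega) |>.2 (Nat.le_of_dvd (by omega) hd)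
    have : r ≤ j / i := Nat.le_of_dvd (by omega) hrd
    have : j / i ≤ j := Nat.div_le_self j i
    omega

-- key split for the zeta sieve: multiples with p-smooth cofactor =
-- (cofactor p-free) ⊎ (multiples of k*p with p-smooth cofactor)
lemma mset_disj (N p k : Nat) (hp : p.Prime) (hk : 1 ≤ k) :
    Disjoint (mset N (p - 1) k) (mset N p (k * p)) := by
  rw [Finset.disjoint_left]
  intro j hjl hjr
  simp only [mset, Finset.mem_filter, Finset.mem_Icc] at hjl hjr
  obtain ⟨⟨hj1, hj2⟩, hdk, hsml⟩ := hjl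
  obtain ⟨_, hdkp, _⟩ := hjr
  obtain ⟨v, hv⟩ := hdkp
  have hjk : j / k = p * v := by
    rw [hv, mul_assoc, Nat.mul_div_cancel_left _ (by omega)]
  have hp2 := hp.two_le
  have hv1 : 1 ≤ v := by
    rcases Nat.eq_zero_or_pos v with h | h
    · subst h; rw [mul_zero] at hv; omega
    · exact h
  have hpm : p ∈ (j / k).primeFactors :=
    Nat.mem_primeFactors.2 ⟨hp, by rw [hjk]; exact Dvd.intro v rfl, by rw [hjk]; exact Nat.mul_ne_zero (by omega) (by omega)⟩
  have := hsml p hpm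
  have := hp.two_le
  omega

lemma mset_split (N p k : Nat) (hp : p.Prime) (hk : 1 ≤ k) :
    mset N p k = mset N (p - 1) k ∪ mset N p (k * p) := by
  have hp2 := hp.two_le
  ext j
  simp only [mset, Finset.mem_filter, Finset.mem_Icc, Finset.mem_union]
  constructor
  · rintro ⟨⟨hj1, hj2⟩, hdk, hsm⟩
    by_cases hpd : p ∣ j / k
    · right
      obtain ⟨u, hu⟩ := hpd
      have hjk1 : 1 ≤ j / k := Nat.one_le_div_iff (by omega) |>.2 (Nat.le_of_dvd (by omega) hdk)
      have hu1 : 1 ≤ u := by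
        rcases Nat.eq_zero_or_pos u with h | h
        · subst h; rw [mul_zero] at hu; omega
        · exact h
      have hdkp : k * p ∣ j := by
        have hjval : j = k * (j / k) := (Nat.mul_div_cancel' hdk).symm
        exact ⟨u, by rw [hjval, hu, mul_assoc]⟩
      refine ⟨⟨hj1, hj2⟩, hdkp, fun r hr => ?_⟩
      have hquot : j / (k * p) = u := by
        obtain ⟨w, hw⟩ := hdkp
        have hjval : j = k * (j / k) := (Nat.mul_div_cancel' hdk).symm
        rw [hjval, hu]
        rw [show k * (p * u) = (k * p) * u by ring, Nat.mul_div_cancel_left _ (by positivity)]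
      rw [hquot] at hr
      apply hsm
      have hsub : u.primeFactors ⊆ (j / k).primeFactors := by
        apply Nat.primeFactors_mono ⟨p, by rw [hu]; ring⟩
        omega
      exact hsub hr
    · left
      refine ⟨⟨hj1, hj2⟩, hdk, fun r hr => ?_⟩
      have := hsm r hr
      have : r ≠ p := by
        rintro rfl
        exact hpd (Nat.mem_primeFactors.1 hr).2.1
      omega
  · rintro (⟨⟨hj1, hj2⟩, hdk, hsm⟩ | ⟨⟨hj1, hj2⟩, hdkp, hsm⟩)
    · exact ⟨⟨hj1, hj2⟩, hdk, fun r hr => by have := hsm r hr; omega⟩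
    · obtain ⟨v, hv⟩ := hdkp
      have hv1 : 1 ≤ v := by
        rcases Nat.eq_zero_or_pos v with h | h
        · subst h; rw [mul_zero] at hv; omega
        · exact h
      have hdk : k ∣ j := ⟨p * v, by rw [hv]; ring⟩
      have hjk : j / k = p * v := by
        rw [hv, mul_assoc, Nat.mul_div_cancel_left _ (by omega)]
      have hquot : j / (k * p) = v := by
        rw [hv, Nat.mul_div_cancel_left _ (by positivity)]
      refine ⟨⟨hj1, hj2⟩, hdk, fun r hr => ?_⟩
      rw [hjk] at hr
      rw [Nat.primeFactors_mul (by omega) (by omega), hp.primeFactors] at hr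
      rcases Finset.mem_union.1 hr with h | h
      · simp at h; omega
      · have := hsm r (by rwa [hquot])
        exact this
  
lemma ZSq_key (f : Nat → Int) (N p k : Nat) (hp : p.Prime) (hk : 1 ≤ k) :
    ZSq f N p k = ZSq f N (p - 1) k + ZSq f N p (k * p) := by
  unfold ZSq
  rw [mset_split N p k hp hk, Finset.sum_union (mset_disj N p k hp hk)]


-- telescoping step for the Moebius sieve pass
lemma mset_pfree (N p i : Nat) (hp : p.Prime) (hi : 1 ≤ i) :
    (mset N p i).filter (fun j => ¬ p ∣ j / i) = mset N (p - 1) i := by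
  have hp2 := hp.two_le
  ext j
  simp only [mset, Finset.mem_filter, Finset.mem_Icc]
  constructor
  · rintro ⟨⟨⟨hj1, hj2⟩, hdk, hsm⟩, hnd⟩
    refine ⟨⟨hj1, hj2⟩, hdk, fun r hr => ?_⟩
    have := hsm r hr
    have : r ≠ p := by
      rintro rfl
      exact hnd (Nat.mem_primeFactors.1 hr).2.1
    omega
  · rintro ⟨⟨hj1, hj2⟩, hdk, hsm⟩
    have hjk1 : 1 ≤ j / i := Nat.one_le_div_iff (by omega) |>.2 (Nat.le_of_dvd (by omega) hdk)
    refine ⟨⟨⟨hj1, hj2⟩, hdk, fun r hr => by have := hsm r hr; omega⟩, fun hd => ?_⟩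
    have hpm : p ∈ (j / i).primeFactors := Nat.mem_primeFactors.2 ⟨hp, hd, by omega⟩
    have := hsm p hpm
    omega

lemma minv_reindex (N p i : Nat) (hp : p.Prime) (hi : 1 ≤ i) (A : Nat → Int) :
    ∑ j ∈ (mset N p i).filter (fun j => j * p ≤ N), A (j * p)
      = ∑ j ∈ (mset N p i).filter (fun j => p ∣ j / i), A j := by
  have hp2 := hp.two_le
  apply Finset.sum_nbij' (i := fun j => j * p) (j := fun j => j / p)
  · intro j hj
    simp only [mset, Finset.mem_filter, Finset.mem_Icc] at hj ⊢
    obtain ⟨⟨⟨hj1, hj2⟩, hdk, hsm⟩, hle⟩ := hj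
    have hjq : j = i * (j / i) := (Nat.mul_div_cancel' hdk).symm
    have hq1 : 1 ≤ j / i := Nat.one_le_div_iff (by omega) |>.2 (Nat.le_of_dvd (by omega) hdk)
    have hquot : j * p / i = j / i * p := by
      rw [show j * p = i * (j / i * p) by rw [← mul_assoc, ← hjq]]
      rw [Nat.mul_div_cancel_left _ (by omega)]
    refine ⟨⟨⟨le_trans hj1 (Nat.le_mul_of_pos_right j (by omega)), hle⟩,
      Dvd.dvd.mul_right hdk p, fun r hr => ?_⟩, ?_⟩
    · rw [hquot, Nat.primeFactors_mul (by omega) (by omega), hp.primeFactors] at hr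
      rcases Finset.mem_union.1 hr with h | h
      · exact hsm r h
      · simp at h; omega
    · rw [hquot]; exact dvd_mul_left p (j / i)
  · intro j hj
    simp only [mset, Finset.mem_filter, Finset.mem_Icc] at hj ⊢
    obtain ⟨⟨⟨hj1, hj2⟩, hdk, hsm⟩, hpd⟩ := hj
    obtain ⟨w, hw⟩ := hpd
    have hjq : j = i * (j / i) := (Nat.mul_div_cancel' hdk).symm
    have hq1 : 1 ≤ j / i := Nat.one_le_div_iff (by omega) |>.2 (Nat.le_of_dvd (by omega) hdk)
    have hw1 : 1 ≤ w := by
      rcases Nat.eq_zero_or_pos w with h | h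
      · subst h; rw [mul_zero] at hw; omega
      · exact h
    have hjval : j = i * w * p := by rw [hjq, hw]; ring
    have hjp : j / p = i * w := by rw [hjval, Nat.mul_div_cancel _ (by omega)]
    have hqq : j / p / i = w := by rw [hjp, Nat.mul_div_cancel_left _ (by omega)]
    have hb1 : 1 ≤ i * w := Nat.mul_pos (by omega) (by omega)
    have hb2 : i * w * p ≤ N := by omega
    refine ⟨⟨⟨by rw [hjp]; exact hb1, by rw [hjp]; exact le_trans (Nat.le_mul_of_pos_right _ (by omega)) hb2⟩,
      ⟨w, hjp⟩, fun r hr => ?_⟩, by rw [hjp]; exact hb2⟩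
    · rw [hqq] at hr
      apply hsm r
      have hsub : w.primeFactors ⊆ (j / i).primeFactors := by
        apply Nat.primeFactors_mono ⟨p, by rw [hw]; ring⟩
        omega
      exact hsub hr
  · intro j hj
    exact Nat.mul_div_cancel j (by omega)
  · intro j hj
    simp only [mset, Finset.mem_filter] at hj
    obtain ⟨⟨_, hdk, _⟩, hpd⟩ := hj
    obtain ⟨w, hw⟩ := hpd
    have hjq : j = i * (j / i) := (Nat.mul_div_cancel' hdk).symm
    have : p ∣ j := by rw [hjq, hw]; exact ⟨i * w, by ring⟩
    exact Nat.div_mul_cancel this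
  · intro j hj; rfl

lemma minv_step (N p : Nat) (hp : p.Prime) (f A A' : Nat → Int)
    (h1 : ∀ k, 1 ≤ k → k * p ≤ N → A' k = A k - A (k * p))
    (h2 : ∀ k, 1 ≤ k → N < k * p → A' k = A k)
    (hinv : ∀ i, 1 ≤ i → i ≤ N → ∑ j ∈ mset N (p - 1) i, A j = f i) :
    ∀ i, 1 ≤ i → i ≤ N → ∑ j ∈ mset N p i, A' j = f i := by
  intro i hi hiN
  have hstep : ∀ j ∈ mset N p i, A' j = A j - (if j * p ≤ N then A (j * p) else 0) := by
    intro j hj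
    simp only [mset, Finset.mem_filter, Finset.mem_Icc] at hj
    by_cases h : j * p ≤ N
    · rw [if_pos h]; exact h1 j (by omega) h
    · rw [if_neg h]; rw [h2 j (by omega) (by omega)]; ring
  rw [Finset.sum_congr rfl hstep, Finset.sum_sub_distrib, Finset.sum_ite, Finset.sum_const_zero,
    add_zero, minv_reindex N p i hp hi A]
  rw [show ∑ j ∈ mset N p i, A j
      = ∑ j ∈ (mset N p i).filter (fun j => p ∣ j / i), A j
        + ∑ j ∈ (mset N p i).filter (fun j => ¬ p ∣ j / i), A j from
    (Finset.sum_filter_add_sum_filter_not _ _ _).symm]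
  rw [mset_pfree N p i hp hi, hinv i hi hiN]
  ring


-- a number ≥ 2 with no prime factor < itself is prime
lemma prime_of_no_small (p : Nat) (h2 : 2 ≤ p) (h : ∀ r, r.Prime → r ∣ p → ¬ r < p) : p.Prime := by
  have hmf : p.minFac.Prime := Nat.minFac_prime (by omega)
  have hd : p.minFac ∣ p := Nat.minFac_dvd p
  have := h _ hmf hd
  have hle : p.minFac ≤ p := Nat.le_of_dvd (by omega) hd
  have : p.minFac = p := by omega
  rwa [← this]

-- generic forward pass: each step writes position i with a value read from positions ≥ i
lemma fwd_fold_char (φ : Nat → List Int → Int)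
    (hφ : ∀ i (C C' : List Int), C.length = C'.length →
      (∀ j, i ≤ j → C.getD j 0 = C'.getD j 0) → φ i C = φ i C')
    (A : List Int) : ∀ t : Nat,
    ((List.range' 1 t).foldl (fun C i => C.set i (φ i C)) A).length = A.length ∧
    ∀ j, ((List.range' 1 t).foldl (fun C i => C.set i (φ i C)) A).getD j 0 =
      if 1 ≤ j ∧ j ≤ t ∧ j < A.length then φ j A else A.getD j 0 := by
  intro t
  induction t with
  | zero => exact ⟨rfl, fun j => by rw [if_neg (by omega)]; rfl⟩
  | succ t ih =>
    obtain ⟨ihl, ihv⟩ := ih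
    rw [List.range'_concat, List.foldl_append]
    simp only [one_mul]
    set R := (List.range' 1 t).foldl (fun C i => C.set i (φ i C)) A with hR
    simp only [List.foldl_cons, List.foldl_nil]
    have hphi : φ (1 + t) R = φ (1 + t) A := by
      apply hφ _ _ _ ihl
      intro j hj
      rw [ihv j, if_neg (by omega)]
    constructor
    · simp [ihl]
    · intro j
      rw [getD_set', hphi, ihl]
      by_cases hj : 1 + t = j ∧ 1 + t < A.length
      · rw [if_pos hj, if_pos (by omega)]
        have : j = 1 + t := hj.1.symm
        subst this; rfl
      · rw [if_neg hj, ihv j]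
        by_cases hc : 1 ≤ j ∧ j ≤ t ∧ j < A.length
        · rw [if_pos hc, if_pos (by omega)]
        · rw [if_neg hc, if_neg (by omega)]


-- descending zeta inner pass characterisation
lemma zinner_char (N p : Nat) (f : Nat → Int) (hp : p.Prime) :
    ∀ (c : Nat), ∀ (a : Nat) (S A : List Int), 1 ≤ a → a + c = N / p + 1 →
    A.length = N + 1 → S.length = N + 1 →
    (∀ k, 1 ≤ k → k ≤ N → A.getD k 0 = ZSq f N (p - 1) k) →
    (let st := ((List.range' a c).reverse).foldl
        (fun SA k => (SA.1.set (k * p) 0, SA.2.set k (SA.2.getD k 0 + SA.2.getD (k * p) 0))) (S, A)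
     st.2.length = N + 1 ∧ st.1.length = N + 1 ∧ st.2.getD 0 0 = A.getD 0 0 ∧
     (∀ k, 1 ≤ k → k ≤ N →
        st.2.getD k 0 = if a ≤ k ∧ k ≤ N / p then ZSq f N p k else ZSq f N (p - 1) k) ∧
     (∀ m, st.1.getD m 0 = if p ∣ m ∧ a * p ≤ m ∧ m ≤ (N / p) * p then 0 else S.getD m 0)) := by
  have hp2 := hp.two_le
  intro c
  induction c with
  | zero =>
    intro a S A ha hsum hlA hlS hA
    simp only [show List.range' a 0 = [] from rfl, List.reverse_nil, List.foldl_nil]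
    refine ⟨hlA, hlS, by trivial, fun k hk1 hkN => ?_, fun m => ?_⟩
    · rw [if_neg (by omega), hA k hk1 hkN]
    · rw [if_neg ?_]
      rintro ⟨hd, h2, h3⟩
      have : a * p ≤ (N / p) * p := le_trans h2 h3
      have : a ≤ N / p := Nat.le_of_mul_le_mul_right this (by omega)
      omega
  | succ c ih =>
    intro a S A ha hsum hlA hlS hA
    have haNp : a ≤ N / p := by omega
    have hap : a * p ≤ N := le_trans (Nat.mul_le_mul_right p haNp) (Nat.div_mul_le_self N p)
    have hapgt : a < a * p := (Nat.lt_mul_iff_one_lt_right (by omega)).2 (by omega)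
    rw [List.range'_succ, List.reverse_cons, List.foldl_append]
    obtain ⟨ihA, ihS, ih0, ihv, ihs⟩ := ih (a + 1) S A (by omega) (by omega) hlA hlS hA
    set st := ((List.range' (a + 1) c).reverse).foldl
        (fun SA k => (SA.1.set (k * p) 0, SA.2.set k (SA.2.getD k 0 + SA.2.getD (k * p) 0))) (S, A)
      with hst
    simp only [List.foldl_cons, List.foldl_nil]
    have hvap : st.2.getD (a * p) 0 = ZSq f N p (a * p) := by
      by_cases hc : a * p ≤ N / p
      · rw [ihv (a * p) (by omega) hap, if_pos ⟨by omega, hc⟩]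
      · rw [ihv (a * p) (by omega) hap, if_neg (by omega)]
        unfold ZSq
        rw [mset_top N p (a * p) (by omega) ((Nat.div_lt_iff_lt_mul (by omega)).1 (by omega))]
    have hva : st.2.getD a 0 = ZSq f N (p - 1) a := by
      rw [ihv a (by omega) (by omega), if_neg (by omega)]
    have hval : st.2.getD a 0 + st.2.getD (a * p) 0 = ZSq f N p a := by
      rw [hva, hvap, ZSq_key f N p a hp (by omega)]
    refine ⟨by simpa using ihA, by simpa using ihS, ?_, fun k hk1 hkN => ?_, fun m => ?_⟩
    · show (st.2.set a _).getD 0 0 = _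
      rw [getD_set', if_neg (by omega), ih0]
    · show (st.2.set a _).getD k 0 = _
      rw [getD_set', hval]
      by_cases hk : a = k ∧ a < st.2.length
      · rw [if_pos hk, ← hk.1, if_pos ⟨le_refl a, haNp⟩]
      · rw [ihA] at hk
        rw [if_neg (by rw [ihA]; exact hk), ihv k hk1 hkN]
        by_cases hc : a + 1 ≤ k ∧ k ≤ N / p
        · rw [if_pos hc, if_pos (by omega)]
        · rw [if_neg hc, if_neg (by omega)]
    · show (st.1.set (a * p) 0).getD m 0 = _
      rw [getD_set', ihs]
      by_cases hm : a * p = m ∧ a * p < st.1.length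
      · rw [if_pos hm, if_pos ⟨⟨a, by rw [← hm.1]; ring⟩, le_of_eq hm.1,
          le_trans (le_of_eq hm.1.symm) (Nat.mul_le_mul_right p haNp)⟩]
      · rw [ihS] at hm
        rw [if_neg (by rw [ihS]; exact hm)]
        by_cases hc : p ∣ m ∧ (a + 1) * p ≤ m ∧ m ≤ (N / p) * p
        · rw [if_pos hc, if_pos ⟨hc.1, le_trans (Nat.mul_le_mul_right p (by omega)) hc.2.1, hc.2.2⟩]
        · rw [if_neg hc, if_neg ?_]
          rintro ⟨hd, h2, h3⟩
          obtain ⟨k', hk'⟩ := hd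
          have hne : a * p ≠ m := fun h => hm ⟨h, by omega⟩
          have hgt : a < k' := by
            rcases Nat.lt_or_ge a k' with h | h
            · exact h
            · exfalso
              have : m ≤ a * p := by rw [hk']; nlinarith
              omega
          exact hc ⟨⟨k', hk'⟩, by rw [hk']; nlinarith, h3⟩


-- ascending Moebius inner pass characterisation (parallel reads)
lemma minner_char (N p : Nat) (hp2 : 2 ≤ p) (S A : List Int)
    (hlenA : A.length = N + 1) (hlenS : S.length = N + 1) :
    ∀ t, t ≤ N / p →
    (let st := (List.range' 1 t).foldl
        (fun SA k => (SA.1.set (k * p) 0, SA.2.set k (SA.2.getD k 0 - SA.2.getD (k * p) 0))) (S, A)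
     st.2.length = N + 1 ∧ st.1.length = N + 1 ∧
     (∀ k, st.2.getD k 0 = if 1 ≤ k ∧ k ≤ t then A.getD k 0 - A.getD (k * p) 0 else A.getD k 0) ∧
     (∀ m, st.1.getD m 0 = if p ∣ m ∧ p ≤ m ∧ m ≤ t * p then 0 else S.getD m 0)) := by
  intro t
  induction t with
  | zero =>
    intro _
    simp only [show List.range' 1 0 = [] from rfl, List.foldl_nil]
    refine ⟨hlenA, hlenS, fun k => by rw [if_neg (by omega)], fun m => ?_⟩
    rw [if_neg (by rintro ⟨_, h2, h3⟩; omega)]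
  | succ t ih =>
    intro ht
    obtain ⟨ihA, ihS, ihv, ihs⟩ := ih (by omega)
    simp only [List.range'_concat, List.foldl_append, one_mul, List.foldl_cons, List.foldl_nil]
    set st := (List.range' 1 t).foldl
        (fun SA k => (SA.1.set (k * p) 0, SA.2.set k (SA.2.getD k 0 - SA.2.getD (k * p) 0))) (S, A)
      with hst
    have hidx : 1 + t ≤ N / p := by omega
    have hNp : N / p ≤ N := Nat.div_le_self N p
    have hmul : (1 + t) * p ≤ N := le_trans (Nat.mul_le_mul_right p hidx) (Nat.div_mul_le_self N p)
    have hval : st.2.getD (1 + t) 0 - st.2.getD ((1 + t) * p) 0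
        = A.getD (1 + t) 0 - A.getD ((1 + t) * p) 0 := by
      rw [ihv, ihv, if_neg (by omega), if_neg (by rintro ⟨h1, h2⟩; nlinarith)]
    refine ⟨by simpa using ihA, by simpa using ihS, fun k => ?_, fun m => ?_⟩
    · show (st.2.set (1 + t) _).getD k 0 = _
      rw [getD_set', hval]
      by_cases hk : 1 + t = k ∧ 1 + t < st.2.length
      · rw [if_pos hk, if_pos (by omega)]
        rw [← hk.1]
      · rw [if_neg hk, ihv]
        rw [ihA] at hk
        by_cases hc : 1 ≤ k ∧ k ≤ t
        · rw [if_pos hc, if_pos (by omega)]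
        · rw [if_neg hc, if_neg (by omega)]
    · show (st.1.set ((1 + t) * p) 0).getD m 0 = _
      rw [getD_set', ihs]
      rw [ihS]
      by_cases hm : (1 + t) * p = m ∧ (1 + t) * p < N + 1
      · rw [if_pos hm, if_pos ?_]
        refine ⟨⟨1 + t, by rw [← hm.1]; ring⟩, ?_, le_of_eq (by rw [← hm.1]; ring)⟩
        · calc p = 1 * p := (one_mul p).symm
          _ ≤ (1 + t) * p := Nat.mul_le_mul_right p (by omega)
          _ = m := hm.1
      · rw [if_neg hm]
        by_cases hc : p ∣ m ∧ p ≤ m ∧ m ≤ t * p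
        · rw [if_pos hc, if_pos ⟨hc.1, hc.2.1, by nlinarith [hc.2.2]⟩]
        · rw [if_neg hc, if_neg ?_]
          rintro ⟨hd, hpm, hmle⟩
          obtain ⟨k', hk'⟩ := hd
          have hgt : ¬ m ≤ t * p := fun h => hc ⟨⟨k', hk'⟩, hpm, h⟩
          have h1 : t < k' := by
            by_contra h
            have h' := Nat.le_of_not_lt h
            exact hgt (by rw [hk']; nlinarith)
          have h2 : k' ≤ t + 1 := by
            by_contra h
            have h' := Nat.lt_of_not_le h
            nlinarith [hmle]
          exact hm ⟨by rw [hk', show k' = t + 1 by omega]; ring, by omega⟩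


-- outer zeta sieve invariant
lemma zouter_char (N : Nat) (C : List Int) (hlen : C.length = N + 1) :
    ∀ q, 1 ≤ q → q ≤ N →
    (let st := (List.range' 2 (q - 1)).foldl (sieveZstep N) (List.replicate (N + 1) (1 : Int), C)
     st.2.length = N + 1 ∧ st.1.length = N + 1 ∧ st.2.getD 0 0 = C.getD 0 0 ∧
     (∀ k, 1 ≤ k → k ≤ N → st.2.getD k 0 = ZSq (fIdx C) N q k) ∧
     (∀ m, 2 ≤ m → m ≤ N → (st.1.getD m 0 = 0 ↔ ∃ r, r.Prime ∧ r ≤ q ∧ r ∣ m))) := by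
  intro q hq1
  induction q, hq1 using Nat.le_induction with
  | base =>
    intro _
    simp only [show (1 : Nat) - 1 = 0 from rfl, show List.range' 2 0 = [] from rfl, List.foldl_nil]
    refine ⟨hlen, by simp, by trivial, fun k hk1 hkN => ?_, fun m hm2 hmN => ?_⟩
    · unfold ZSq
      rw [mset_one N k hk1 hkN, Finset.sum_singleton]
      rfl
    · rw [getD_replicate', if_pos (by omega)]
      constructor
      · intro h; exact absurd h (by norm_num)
      · rintro ⟨r, hrp, hr1, _⟩
        have := hrp.two_le
        omega
  | succ q hq ih =>
    intro hqN
    obtain ⟨ihA, ihS, ih0, ihv, ihs⟩ := ih (by omega)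
    have hrange : List.range' 2 (q + 1 - 1) = List.range' 2 (q - 1) ++ [q + 1] := by
      rw [show q + 1 - 1 = (q - 1) + 1 by omega, List.range'_concat,
        show 2 + 1 * (q - 1) = q + 1 by omega]
    rw [hrange, List.foldl_append, List.foldl_cons, List.foldl_nil]
    set st := (List.range' 2 (q - 1)).foldl (sieveZstep N) (List.replicate (N + 1) (1 : Int), C)
      with hst
    unfold sieveZstep
    by_cases hcond : st.1.getD (q + 1) 0 ≠ 0
    · rw [if_pos hcond]
      -- the sieve found no prime factor ≤ q of q+1, so q+1 is prime
      have hnof : ¬ ∃ r, r.Prime ∧ r ≤ q ∧ r ∣ (q + 1) := fun h =>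
        hcond ((ihs (q + 1) (by omega) hqN).2 h)
      have hp : (q + 1).Prime := by
        apply prime_of_no_small (q + 1) (by omega)
        intro r hrp hrd hlt
        exact hnof ⟨r, hrp, by omega, hrd⟩
      have hA' : ∀ k, 1 ≤ k → k ≤ N → st.2.getD k 0 = ZSq (fIdx C) N ((q + 1) - 1) k := by
        intro k h1 h2
        rw [show q + 1 - 1 = q from rfl]
        exact ihv k h1 h2
      obtain ⟨zA, zS, z0, zv, zs⟩ := zinner_char N (q + 1) (fIdx C) hp (N / (q + 1)) 1
        st.1 st.2 (le_refl 1) (by omega) ihA ihS hA'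
      refine ⟨zA, zS, by rw [z0, ih0], fun k hk1 hkN => ?_, fun m hm2 hmN => ?_⟩
      · rw [zv k hk1 hkN]
        by_cases hc : k ≤ N / (q + 1)
        · rw [if_pos ⟨by omega, hc⟩]
        · rw [if_neg (by omega)]
          unfold ZSq
          rw [mset_top N (q + 1) k (by omega) ((Nat.div_lt_iff_lt_mul (by omega)).1 (by omega)),
            show q + 1 - 1 = q from rfl]
      · rw [zs m]
        by_cases hc : (q + 1) ∣ m ∧ 1 * (q + 1) ≤ m ∧ m ≤ (N / (q + 1)) * (q + 1)
        · rw [if_pos hc]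
          constructor
          · intro _
            exact ⟨q + 1, hp, le_refl _, hc.1⟩
          · intro _; rfl
        · rw [if_neg hc, ihs m hm2 hmN]
          constructor
          · rintro ⟨r, hrp, hrle, hrd⟩
            exact ⟨r, hrp, by omega, hrd⟩
          · rintro ⟨r, hrp, hrle, hrd⟩
            refine ⟨r, hrp, ?_, hrd⟩
            rcases Nat.lt_or_ge r (q + 1) with h | h
            · omega
            · exfalso
              have hreq : r = q + 1 := by omega
              obtain ⟨k', hk'⟩ := hrd
              rw [hreq] at hk'
              have hk'le : k' ≤ N / (q + 1) :=
                Nat.le_div_iff_mul_le (by omega) |>.2 (by rw [mul_comm]; omega)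
              refine hc ⟨⟨k', hk'⟩, by rw [one_mul]; exact Nat.le_of_dvd (by omega) ⟨k', hk'⟩, ?_⟩
              rw [hk']
              calc (q + 1) * k' = k' * (q + 1) := by ring
              _ ≤ (N / (q + 1)) * (q + 1) := Nat.mul_le_mul_right (q + 1) hk'le
    · rw [if_neg hcond]
      have h0 : st.1.getD (q + 1) 0 = 0 := by omega
      obtain ⟨r, hrp, hrle, hrd⟩ := (ihs (q + 1) (by omega) hqN).1 h0
      have hnp : ¬ (q + 1).Prime := by
        intro hP
        rcases (Nat.Prime.eq_one_or_self_of_dvd hP r hrd) with h | h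
        · exact absurd h hrp.one_lt.ne'
        · omega
      refine ⟨ihA, ihS, ih0, fun k hk1 hkN => ?_, fun m hm2 hmN => ?_⟩
      · rw [ihv k hk1 hkN]
        unfold ZSq
        rw [mset_nonprime N (q + 1) k (by omega) hnp, Nat.add_sub_cancel]
      · rw [ihs m hm2 hmN]
        constructor
        · rintro ⟨r', h1, h2, h3⟩; exact ⟨r', h1, by omega, h3⟩
        · rintro ⟨r', h1, h2, h3⟩
          refine ⟨r', h1, ?_, h3⟩
          rcases Nat.lt_or_ge r' (q + 1) with h | h
          · omega
          · exfalso; exact hnp (by rwa [show r' = q + 1 by omega] at h1)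


-- outer Moebius sieve invariant
lemma mouter_char (N : Nat) (C : List Int) (hlen : C.length = N + 1) :
    ∀ q, 1 ≤ q → q ≤ N →
    (let st := (List.range' 2 (q - 1)).foldl (sieveMstep N) (List.replicate (N + 1) (1 : Int), C)
     st.2.length = N + 1 ∧ st.1.length = N + 1 ∧ st.2.getD 0 0 = C.getD 0 0 ∧
     (∀ i, 1 ≤ i → i ≤ N → ∑ j ∈ mset N q i, st.2.getD j 0 = fIdx C i) ∧
     (∀ m, 2 ≤ m → m ≤ N → (st.1.getD m 0 = 0 ↔ ∃ r, r.Prime ∧ r ≤ q ∧ r ∣ m))) := by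
  intro q hq1
  induction q, hq1 using Nat.le_induction with
  | base =>
    intro _
    simp only [show (1 : Nat) - 1 = 0 from rfl, show List.range' 2 0 = [] from rfl, List.foldl_nil]
    refine ⟨hlen, by simp, by trivial, fun i hi1 hiN => ?_, fun m hm2 hmN => ?_⟩
    · rw [mset_one N i hi1 hiN, Finset.sum_singleton]
      rfl
    · rw [getD_replicate', if_pos (by omega)]
      constructor
      · intro h; exact absurd h (by norm_num)
      · rintro ⟨r, hrp, hr1, _⟩
        have := hrp.two_le
        omega
  | succ q hq ih =>
    intro hqN
    obtain ⟨ihA, ihS, ih0, ihv, ihs⟩ := ih (by omega)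
    have hrange : List.range' 2 (q + 1 - 1) = List.range' 2 (q - 1) ++ [q + 1] := by
      rw [show q + 1 - 1 = (q - 1) + 1 by omega, List.range'_concat,
        show 2 + 1 * (q - 1) = q + 1 by omega]
    rw [hrange, List.foldl_append, List.foldl_cons, List.foldl_nil]
    set st := (List.range' 2 (q - 1)).foldl (sieveMstep N) (List.replicate (N + 1) (1 : Int), C)
      with hst
    unfold sieveMstep
    by_cases hcond : st.1.getD (q + 1) 0 ≠ 0
    · rw [if_pos hcond]
      have hnof : ¬ ∃ r, r.Prime ∧ r ≤ q ∧ r ∣ (q + 1) := fun h =>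
        hcond ((ihs (q + 1) (by omega) hqN).2 h)
      have hp : (q + 1).Prime := by
        apply prime_of_no_small (q + 1) (by omega)
        intro r hrp hrd hlt
        exact hnof ⟨r, hrp, by omega, hrd⟩
      obtain ⟨zA, zS, zv, zs⟩ := minner_char N (q + 1) hp.two_le st.1 st.2 ihA ihS
        (N / (q + 1)) (le_refl _)
      refine ⟨zA, zS, by rw [zv 0, if_neg (by omega)]; exact ih0, fun i hi1 hiN => ?_,
        fun m hm2 hmN => ?_⟩
      · apply minv_step N (q + 1) hp (fIdx C) (fun k => st.2.getD k 0)
          (fun k => ((List.range' 1 (N / (q + 1))).foldl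
            (fun SA k => (SA.1.set (k * (q + 1)) 0,
              SA.2.set k (SA.2.getD k 0 - SA.2.getD (k * (q + 1)) 0))) (st.1, st.2)).2.getD k 0)
          ?_ ?_ ?_ i hi1 hiN
        · intro k hk1 hkle
          beta_reduce
          rw [zv k, if_pos ⟨hk1, Nat.le_div_iff_mul_le (by omega) |>.2 hkle⟩]
        · intro k hk1 hkgt
          beta_reduce
          rw [zv k, if_neg ?_]
          rintro ⟨_, h2⟩
          have : k * (q + 1) ≤ N :=
            le_trans (Nat.mul_le_mul_right (q + 1) h2) (Nat.div_mul_le_self N (q + 1))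
          omega
        · intro i' hi'1 hi'N
          rw [Nat.add_sub_cancel]
          exact ihv i' hi'1 hi'N
      · rw [zs m]
        by_cases hc : (q + 1) ∣ m ∧ (q + 1) ≤ m ∧ m ≤ (N / (q + 1)) * (q + 1)
        · rw [if_pos hc]
          constructor
          · intro _
            exact ⟨q + 1, hp, le_refl _, hc.1⟩
          · intro _; rfl
        · rw [if_neg hc, ihs m hm2 hmN]
          constructor
          · rintro ⟨r, hrp, hrle, hrd⟩; exact ⟨r, hrp, by omega, hrd⟩
          · rintro ⟨r, hrp, hrle, hrd⟩
            refine ⟨r, hrp, ?_, hrd⟩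
            rcases Nat.lt_or_ge r (q + 1) with h | h
            · omega
            · exfalso
              have hreq : r = q + 1 := by omega
              obtain ⟨k', hk'⟩ := hrd
              rw [hreq] at hk'
              have hk'le : k' ≤ N / (q + 1) :=
                Nat.le_div_iff_mul_le (by omega) |>.2 (by rw [mul_comm]; omega)
              refine hc ⟨⟨k', hk'⟩, Nat.le_of_dvd (by omega) ⟨k', hk'⟩, ?_⟩
              rw [hk']
              calc (q + 1) * k' = k' * (q + 1) := by ring
              _ ≤ (N / (q + 1)) * (q + 1) := Nat.mul_le_mul_right (q + 1) hk'le
    · rw [if_neg hcond]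
      have h0 : st.1.getD (q + 1) 0 = 0 := by omega
      obtain ⟨r, hrp, hrle, hrd⟩ := (ihs (q + 1) (by omega) hqN).1 h0
      have hnp : ¬ (q + 1).Prime := by
        intro hP
        rcases (Nat.Prime.eq_one_or_self_of_dvd hP r hrd) with h | h
        · exact absurd h hrp.one_lt.ne'
        · omega
      refine ⟨ihA, ihS, ih0, fun i hi1 hiN => ?_, fun m hm2 hmN => ?_⟩
      · rw [mset_nonprime N (q + 1) i (by omega) hnp, Nat.add_sub_cancel]
        exact ihv i hi1 hiN
      · rw [ihs m hm2 hmN]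
        constructor
        · rintro ⟨r', h1, h2, h3⟩; exact ⟨r', h1, by omega, h3⟩
        · rintro ⟨r', h1, h2, h3⟩
          refine ⟨r', h1, ?_, h3⟩
          rcases Nat.lt_or_ge r' (q + 1) with h | h
          · omega
          · exfalso; exact hnp (by rwa [show r' = q + 1 by omega] at h1)


-- an exact Moebius-inverse G, reduced mod, satisfies the recursive description vref
lemma modG_vref (f G : Nat → Int) (N : Nat)
    (hG : ∀ i, 1 ≤ i → i ≤ N → ∑ j ∈ msetF N i, G j = f i) :
    ∀ i, 1 ≤ i → i ≤ N → PySem.Int.mod (G i) modP = vref f N i := by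
  have hMpos : (0:Int) < modP := by norm_num [modP]
  suffices h : ∀ m i, N + 1 - i ≤ m → 1 ≤ i → i ≤ N → PySem.Int.mod (G i) modP = vref f N i by
    intro i h1 h2
    exact h (N + 1 - i) i (le_refl _) h1 h2
  intro m
  induction m with
  | zero => intro i hm h1 h2; omega
  | succ m ihm =>
    intro i hm h1 h2
    rw [vref_eq]
    have hNi1 : 1 ≤ N / i := Nat.one_le_div_iff (by omega) |>.2 h2
    have hmapeq : (List.range' 2 (N / i - 1)).map (fun k => vref f N (k * i))
        = (List.range' 2 (N / i - 1)).map (fun k => PySem.Int.mod (G (k * i)) modP) := by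
      apply List.map_congr_left
      intro k hk
      obtain ⟨t, ht, hkt⟩ := List.mem_range'.1 hk
      simp only [one_mul] at hkt
      have hkle : k ≤ N / i := by omega
      have hkiN : k * i ≤ N := le_trans (Nat.mul_le_mul_right i hkle) (Nat.div_mul_le_self N i)
      have hkigt : i < k * i := by
        have := (Nat.mul_lt_mul_right (show 0 < i by omega)).2 (show 1 < k by omega)
        omega
      exact (ihm (k * i) (by omega) (by omega) hkiN).symm
    rw [hmapeq]
    have hIcc : ∑ k ∈ Finset.Icc 1 (N / i), G (k * i) = f i := by
      rw [← sum_msetF G N i (by omega)]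
      exact hG i h1 h2
    have h1l : List.range' 1 (N / i) = 1 :: List.range' 2 (N / i - 1) := by
      conv_lhs => rw [show N / i = (N / i - 1) + 1 by omega, List.range'_succ]
    have hsum : ((List.range' 2 (N / i - 1)).map (fun k => G (k * i))).sum = f i - G i := by
      have hx := sum_range'_one (N / i) (fun k => G (k * i))
      rw [h1l] at hx
      simp only [List.map_cons, List.sum_cons, one_mul] at hx
      rw [hIcc] at hx
      linarith
    simp only [PySem.Int.mod_eq_emod_of_pos hMpos]
    rw [show (fun k => G (k * i) % modP) = ((· % modP) ∘ (fun k => G (k * i))) from rfl,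
      ← List.map_map, Int.sub_emod, ← List.sum_int_mod, ← Int.sub_emod, hsum]
    congr 1
    ring


-- descending B-Moebius fold characterisation
lemma mobAlt_inv (N : Nat) (C : List Int) (hlen : C.length = N + 1) :
    ∀ (c : Nat), ∀ (a : Nat), 1 ≤ a → a + c = N + 1 →
    (let res := ((List.range' a c).reverse).foldl
        (fun C i =>
          C.set i (PySem.Int.mod
            (((List.range' 2 (N / i - 1)).map (fun k => k * i)).foldl (fun s j => s - C.getD j 0)
              (C.getD i 0)) modP)) C
     res.length = N + 1 ∧ (∀ j, j < a → res.getD j 0 = C.getD j 0) ∧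
     (∀ j, a ≤ j → j ≤ N → res.getD j 0 = vref (fIdx C) N j)) := by
  intro c
  induction c with
  | zero =>
    intro a ha hsum
    simp only [show List.range' a 0 = [] from rfl, List.reverse_nil, List.foldl_nil]
    exact ⟨hlen, fun j _ => by trivial, fun j hj1 hj2 => by omega⟩
  | succ c ih =>
    intro a ha hsum
    rw [List.range'_succ, List.reverse_cons, List.foldl_append]
    obtain ⟨ihl, ihlow, ihhigh⟩ := ih (a + 1) (by omega) (by omega)
    set res := ((List.range' (a + 1) c).reverse).foldl
        (fun C i =>
          C.set i (PySem.Int.mod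
            (((List.range' 2 (N / i - 1)).map (fun k => k * i)).foldl (fun s j => s - C.getD j 0)
              (C.getD i 0)) modP)) C
      with hres
    simp only [List.foldl_cons, List.foldl_nil]
    have haN : a ≤ N := by omega
    have hval : PySem.Int.mod
        (((List.range' 2 (N / a - 1)).map (fun k => k * a)).foldl (fun s j => s - res.getD j 0)
          (res.getD a 0)) modP = vref (fIdx C) N a := by
      rw [foldl_sub_eq, List.map_map, ihlow a (by omega)]
      have hmapeq : (List.range' 2 (N / a - 1)).map ((fun j => res.getD j 0) ∘ (fun k => k * a))
          = (List.range' 2 (N / a - 1)).map (fun k => vref (fIdx C) N (k * a)) := by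
        apply List.map_congr_left
        intro k hk
        obtain ⟨t, ht, hkt⟩ := List.mem_range'.1 hk
        simp only [one_mul] at hkt
        have hkle : k ≤ N / a := by omega
        have hkaN : k * a ≤ N := le_trans (Nat.mul_le_mul_right a hkle) (Nat.div_mul_le_self N a)
        have hkagt : a < k * a := by
          have := (Nat.mul_lt_mul_right (show 0 < a by omega)).2 (show 1 < k by omega)
          omega
        exact ihhigh (k * a) (by omega) hkaN
      rw [hmapeq, show C.getD a 0 = fIdx C a from rfl, ← vref_eq]
    refine ⟨by simpa using ihl, fun j hj => ?_, fun j hj1 hj2 => ?_⟩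
    · rw [getD_set', if_neg (by omega), ihlow j (by omega)]
    · rw [getD_set', hval]
      by_cases hj : a = j ∧ a < res.length
      · rw [if_pos hj, hj.1]
      · rw [ihl] at hj
        rw [if_neg (by rw [ihl]; exact hj), ihhigh j (by omega) hj2]


-- the two zeta transforms agree
lemma MZT_eq (C : List Int) : Multiple_Zeta_Transform C = zetaAlt C := by
  rcases Nat.eq_zero_or_pos C.length with hnil | hpos
  · rw [List.length_eq_zero_iff.1 hnil]
    rfl
  rcases Nat.eq_zero_or_pos (C.length - 1) with hN0 | hN1
  · -- single-element list: all loops are empty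
    simp only [Multiple_Zeta_Transform, zetaAlt, modPass, hN0,
      show (0 : Nat) - 1 = 0 from rfl, show List.range' 2 0 = [] from rfl,
      show List.range' 1 0 = [] from rfl, List.foldl_nil]
  · set N := C.length - 1 with hNdef
    have hlen : C.length = N + 1 := by omega
    obtain ⟨zl, _, z0, zv, _⟩ := zouter_char N C hlen N (by omega) (le_refl N)
    set stA := (List.range' 2 (N - 1)).foldl (sieveZstep N) (List.replicate (N + 1) (1 : Int), C)
      with hstA
    have hφ1 : ∀ i (Cc Cc' : List Int), Cc.length = Cc'.length →
        (∀ j, i ≤ j → Cc.getD j 0 = Cc'.getD j 0) →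
        PySem.Int.mod (Cc.getD i 0) modP = PySem.Int.mod (Cc'.getD i 0) modP := by
      intro i Cc Cc' _ hag
      rw [hag i (le_refl i)]
    have hml : (modPass N stA.2).length = stA.2.length :=
      (fwd_fold_char (fun i Cc => PySem.Int.mod (Cc.getD i 0) modP) hφ1 stA.2 N).1
    have hmv : ∀ j, (modPass N stA.2).getD j 0 =
        if 1 ≤ j ∧ j ≤ N ∧ j < stA.2.length then PySem.Int.mod (stA.2.getD j 0) modP
        else stA.2.getD j 0 :=
      (fwd_fold_char (fun i Cc => PySem.Int.mod (Cc.getD i 0) modP) hφ1 stA.2 N).2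
    have hφB : ∀ i (Cc Cc' : List Int), Cc.length = Cc'.length →
        (∀ j, i ≤ j → Cc.getD j 0 = Cc'.getD j 0) →
        PySem.Int.mod (((List.range' 1 (N / i)).map (fun k => k * i)).foldl
          (fun s j => s + Cc.getD j 0) 0) modP
          = PySem.Int.mod (((List.range' 1 (N / i)).map (fun k => k * i)).foldl
          (fun s j => s + Cc'.getD j 0) 0) modP := by
      intro i Cc Cc' _ hag
      rw [foldl_add_eq, foldl_add_eq, List.map_map, List.map_map]
      congr 2
      apply congrArg List.sum
      apply List.map_congr_left
      intro k hk
      obtain ⟨t, ht, hkt⟩ := List.mem_range'.1 hk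
      simp only [one_mul] at hkt
      have : i ≤ k * i := Nat.le_mul_of_pos_left i (by omega)
      exact hag (k * i) this
    have hBl : (zetaAlt C).length = C.length :=
      (fwd_fold_char (fun i Cc => PySem.Int.mod (((List.range' 1 (N / i)).map (fun k => k * i)).foldl
        (fun s j => s + Cc.getD j 0) 0) modP) hφB C N).1
    have hBv : ∀ j, (zetaAlt C).getD j 0 =
        if 1 ≤ j ∧ j ≤ N ∧ j < C.length then
          PySem.Int.mod (((List.range' 1 (N / j)).map (fun k => k * j)).foldl
            (fun s j' => s + C.getD j' 0) 0) modP
        else C.getD j 0 :=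
      (fwd_fold_char (fun i Cc => PySem.Int.mod (((List.range' 1 (N / i)).map (fun k => k * i)).foldl
        (fun s j => s + Cc.getD j 0) 0) modP) hφB C N).2
    have hAeq : Multiple_Zeta_Transform C = modPass N stA.2 := rfl
    have hlenEq : (Multiple_Zeta_Transform C).length = (zetaAlt C).length := by
      rw [hAeq, hml, zl, hBl, hlen]
    apply List.ext_getElem hlenEq
    intro j hj1 hj2
    rw [← List.getD_eq_getElem _ 0 hj1, ← List.getD_eq_getElem _ 0 hj2, hAeq, hmv j, hBv j, zl]
    have hjN : j < N + 1 := by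
      rw [hAeq, hml, zl] at hj1
      exact hj1
    rcases Nat.eq_zero_or_pos j with hj0 | hjpos
    · subst hj0
      rw [if_neg (by omega), if_neg (by omega), z0]
    · rw [if_pos ⟨hjpos, by omega, by omega⟩, if_pos ⟨hjpos, by omega, by omega⟩,
        zv j hjpos (by omega)]
      congr 1
      rw [foldl_add_eq, List.map_map, zero_add,
        show ((fun j' => C.getD j' 0) ∘ fun k => k * j) = (fun k => fIdx C (k * j)) from rfl,
        sum_range'_one, ← sum_msetF (fIdx C) N j hjpos]
      unfold ZSq
      rw [mset_all N j hjpos]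


-- the two Moebius transforms agree
lemma MMT_eq (C : List Int) : Multiple_Mobius_Transform C = mobiusAlt C := by
  rcases Nat.eq_zero_or_pos C.length with hnil | hpos
  · rw [List.length_eq_zero_iff.1 hnil]
    rfl
  rcases Nat.eq_zero_or_pos (C.length - 1) with hN0 | hN1
  · simp only [Multiple_Mobius_Transform, mobiusAlt, modPass, hN0,
      show (0 : Nat) - 1 = 0 from rfl, show List.range' 2 0 = [] from rfl,
      show List.range' 1 0 = [] from rfl, List.reverse_nil, List.foldl_nil]
  · set N := C.length - 1 with hNdef
    have hlen : C.length = N + 1 := by omega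
    obtain ⟨ml2, _, m0, mval, _⟩ := mouter_char N C hlen N (by omega) (le_refl N)
    set stM := (List.range' 2 (N - 1)).foldl (sieveMstep N) (List.replicate (N + 1) (1 : Int), C)
      with hstM
    have hφ1 : ∀ i (Cc Cc' : List Int), Cc.length = Cc'.length →
        (∀ j, i ≤ j → Cc.getD j 0 = Cc'.getD j 0) →
        PySem.Int.mod (Cc.getD i 0) modP = PySem.Int.mod (Cc'.getD i 0) modP := by
      intro i Cc Cc' _ hag
      rw [hag i (le_refl i)]
    have hml : (modPass N stM.2).length = stM.2.length :=
      (fwd_fold_char (fun i Cc => PySem.Int.mod (Cc.getD i 0) modP) hφ1 stM.2 N).1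
    have hmv : ∀ j, (modPass N stM.2).getD j 0 =
        if 1 ≤ j ∧ j ≤ N ∧ j < stM.2.length then PySem.Int.mod (stM.2.getD j 0) modP
        else stM.2.getD j 0 :=
      (fwd_fold_char (fun i Cc => PySem.Int.mod (Cc.getD i 0) modP) hφ1 stM.2 N).2
    have hGinv : ∀ i, 1 ≤ i → i ≤ N → ∑ j ∈ msetF N i, stM.2.getD j 0 = fIdx C i := by
      intro i h1 h2
      rw [← mset_all N i h1]
      exact mval i h1 h2
    have hvref := modG_vref (fIdx C) (fun j => stM.2.getD j 0) N hGinv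
    obtain ⟨bl, blow, bhigh⟩ := mobAlt_inv N C hlen N 1 (le_refl 1) (by omega)
    have hAeq : Multiple_Mobius_Transform C = modPass N stM.2 := rfl
    have hBl : (mobiusAlt C).length = N + 1 := bl
    have hBlow : ∀ j, j < 1 → (mobiusAlt C).getD j 0 = C.getD j 0 := blow
    have hBhigh : ∀ j, 1 ≤ j → j ≤ N → (mobiusAlt C).getD j 0 = vref (fIdx C) N j := bhigh
    have hlenEq : (Multiple_Mobius_Transform C).length = (mobiusAlt C).length := by
      rw [hAeq, hml, ml2, hBl]
    apply List.ext_getElem hlenEq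
    intro j hj1 hj2
    rw [← List.getD_eq_getElem _ 0 hj1, ← List.getD_eq_getElem _ 0 hj2, hAeq, hmv j, ml2]
    have hjN : j < N + 1 := by
      rw [hAeq, hml, ml2] at hj1
      exact hj1
    rcases Nat.eq_zero_or_pos j with hj0 | hjpos
    · subst hj0
      rw [if_neg (by omega), m0, hBlow 0 (by omega)]
    · rw [if_pos ⟨hjpos, by omega, by omega⟩, hBhigh j hjpos (by omega)]
      exact hvref j hjpos (by omega)


-- ===== VERDICT (by name: the statement is the Claim_ definition above) =====
theorem Convolution_GCD_spec : Claim_equal_Convolution_GCD := by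
  intro A B _
  unfold Spec_Convolution_GCD Convolution_GCD Convolution_GCD_alt
  simp only [MZT_eq, MMT_eq]
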